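-- pv_equiv track=rewrite | github.com/btrkeks/transcoda | scripts/dataset_generation/augmentation/kern_utils.py | append_to_token
-- ===== SOURCE A (Python) =====
-- _TRAILING_MARKERS = frozenset("LJK[]()/_\\")
--
-- def append_to_token(token: str, suffix: str) -> str:
--     """Append an articulation symbol to a note token.
--
--     Inserts the suffix before trailing markers (beam, tie, slur, stem).
--     For example, appending "'" to "8ee-LJ" produces "8ee-'LJ".
--
--     Args:
--         token: The note token to modify.
--         suffix: The articulation symbol to append (e.g., "'", "z", ";").
--
--     Returns:
--         The modified token with suffix inserted.
--     """
--     # Find where trailing markers begin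
--     insert_pos = len(token)
--     for i in range(len(token) - 1, -1, -1):
--         if token[i] in _TRAILING_MARKERS:
--             insert_pos = i
--         else:
--             break
--
--     return token[:insert_pos] + suffix + token[insert_pos:]
-- ===== SOURCE B (Python) =====
-- _TRAILING_MARKERS = frozenset("LJK[]()/_\\")
--
-- def append_to_token(token: str, suffix: str) -> str:
--     # Single forward pass, no indexing/slicing: buffer the current run of
--     # marker characters; a non-marker flushes the run into the prefix.
--     # At the end the buffered run is exactly the trailing marker run.
--     prefix = []
--     run = []
--     for ch in token:
--         if ch in _TRAILING_MARKERS: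
--             run.append(ch)
--         else:
--             prefix.extend(run)
--             prefix.append(ch)
--             run = []
--     return ''.join(prefix) + suffix + ''.join(run)
-- ===== Notes on version B (the rewrite author's own statement) =====
-- stated objective: alternative
-- what changed: Replaces A's backward index scan (which searches for an insertion position and then slices the token twice) with a single forward character pass over the token using two accumulators - a flushed prefix and a buffered run of marker characters - so no index arithmetic or slicing occurs and the suffix is placed between the two accumulators at the end.
import Mathlib
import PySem

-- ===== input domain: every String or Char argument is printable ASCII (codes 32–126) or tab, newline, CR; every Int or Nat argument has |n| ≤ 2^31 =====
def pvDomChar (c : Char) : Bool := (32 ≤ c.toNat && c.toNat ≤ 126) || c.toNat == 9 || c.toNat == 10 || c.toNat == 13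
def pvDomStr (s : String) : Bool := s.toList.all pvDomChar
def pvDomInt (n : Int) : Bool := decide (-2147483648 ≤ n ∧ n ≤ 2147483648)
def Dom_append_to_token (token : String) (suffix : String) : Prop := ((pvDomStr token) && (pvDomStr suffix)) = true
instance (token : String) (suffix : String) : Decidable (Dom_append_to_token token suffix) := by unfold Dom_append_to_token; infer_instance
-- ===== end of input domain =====

-- B replaces A's backward index scan and double slice with a single forward pass
-- holding two accumulators (flushed prefix, buffered marker run); same cost, different traversal.

-- module constant _TRAILING_MARKERS (shared by both versions, like the Python module constant)
def pvMarkers : List Char := "LJK[]()/_\\".toList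

-- c in _TRAILING_MARKERS (frozenset membership; order irrelevant for membership)
def pvIsMarker (c : Char) : Bool := pvMarkers.contains c

-- ===== PORT A =====
-- the 'for i in range(len(token)-1, -1, -1)' loop with its break: i counts down,
-- argument 'i' here is the number of indices still to visit (current index = i-1);
-- cs.getD (i-1) ' ' is token[i-1], always in range when called from append_to_token.
def pvLoopA (cs : List Char) : Nat → Nat → Nat
  | 0, pos => pos
  | (i+1), pos => if pvIsMarker (cs.getD i ' ') then pvLoopA cs i i else pos

def append_to_token (token : String) (suffix : String) : String :=
  let cs := token.toList
  let insertPos := pvLoopA cs cs.length cs.length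
  -- token[:insert_pos] + suffix + token[insert_pos:]; take/drop are exact here since 0 ≤ insertPos ≤ len
  String.ofList (cs.take insertPos ++ suffix.toList ++ cs.drop insertPos)

-- ===== PORT B =====
-- one iteration of B's forward loop: state = (prefix, run)
def pvStepB (st : List Char × List Char) (c : Char) : List Char × List Char :=
  if pvIsMarker c then (st.1, st.2 ++ [c]) else (st.1 ++ st.2 ++ [c], [])

def append_to_token_alt (token : String) (suffix : String) : String :=
  let st := token.toList.foldl pvStepB ([], [])
  -- ''.join(prefix) + suffix + ''.join(run)
  String.ofList (st.1 ++ suffix.toList ++ st.2)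

-- ===== PRECONDITION & SPEC =====
def Spec_append_to_token (token : String) (suffix : String) (out : String) : Prop := out = append_to_token_alt token suffix
instance (token : String) (suffix : String) (out : String) : Decidable (Spec_append_to_token token suffix out) := by unfold Spec_append_to_token; infer_instance

-- ===== CLAIM (what is proved, stated in full; the proofs are below) =====
def Claim_equal_append_to_token : Prop := ∀ (token : String) (suffix : String), Dom_append_to_token token suffix → Spec_append_to_token token suffix (append_to_token token suffix)

-- ===== LEMMAS AND PROOFS =====

-- A's loop only inspects indices below i, so a character appended at the end is invisible
lemma pvLoopA_append (cs : List Char) (c : Char) (i pos : Nat) (h : i ≤ cs.length) :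
    pvLoopA (cs ++ [c]) i pos = pvLoopA cs i pos := by
  induction i generalizing pos with
  | zero => rfl
  | succ j ih =>
    have hj : j < cs.length := h
    simp only [pvLoopA, List.getD_eq_getElem?_getD, List.getElem?_append_left hj]
    rw [ih j (le_of_lt hj)]

-- A's insertion position equals the length of the prefix before the trailing marker run
lemma pvLoopA_eq (cs : List Char) :
    pvLoopA cs cs.length cs.length = ((cs.reverse.dropWhile pvIsMarker).reverse).length := by
  induction cs using List.reverseRecOn with
  | nil => rfl
  | append_singleton cs c ih =>
    have hlen : (cs ++ [c]).length = cs.length + 1 := by simp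
    rw [hlen]
    simp only [pvLoopA]
    have hget : (cs ++ [c]).getD cs.length ' ' = c := by
      simp [List.getD_eq_getElem?_getD]
    rw [hget, List.reverse_append]
    by_cases hm : pvIsMarker c
    · simp only [hm, if_true]
      rw [pvLoopA_append cs c cs.length cs.length le_rfl, ih]
      simp [hm]
    · simp [hm]

-- B's fold ends in (prefix before the trailing marker run, the trailing marker run)
lemma pvFoldB_eq (cs : List Char) :
    cs.foldl pvStepB ([], []) =
      ((cs.reverse.dropWhile pvIsMarker).reverse, (cs.reverse.takeWhile pvIsMarker).reverse) := by
  induction cs using List.reverseRecOn with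
  | nil => rfl
  | append_singleton cs c ih =>
    rw [List.foldl_append, ih, List.reverse_append]
    by_cases hm : pvIsMarker c
    · simp [pvStepB, hm]
    · have hsplit : (cs.reverse.dropWhile pvIsMarker).reverse
          ++ (cs.reverse.takeWhile pvIsMarker).reverse = cs := by
        rw [← List.reverse_append, List.takeWhile_append_dropWhile, List.reverse_reverse]
      simp [pvStepB, hm, hsplit]

-- ===== VERDICT (by name: the statement is the Claim_ definition above) =====
theorem append_to_token_spec : Claim_equal_append_to_token := by
  intro token suffix _
  unfold Spec_append_to_token append_to_token append_to_token_alt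
  have hsplit : token.toList
      = (token.toList.reverse.dropWhile pvIsMarker).reverse
        ++ (token.toList.reverse.takeWhile pvIsMarker).reverse := by
    rw [← List.reverse_append, List.takeWhile_append_dropWhile, List.reverse_reverse]
  have hpre : (token.toList.reverse.dropWhile pvIsMarker).reverse <+: token.toList :=
    ⟨_, hsplit.symm⟩
  have htake : token.toList.take ((token.toList.reverse.dropWhile pvIsMarker).reverse).length
      = (token.toList.reverse.dropWhile pvIsMarker).reverse :=
    (List.prefix_iff_eq_take.mp hpre).symm
  have hdrop : token.toList.drop ((token.toList.reverse.dropWhile pvIsMarker).reverse).length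
      = (token.toList.reverse.takeWhile pvIsMarker).reverse := by
    conv_lhs => rw [hsplit]
    simp
  simp only [pvLoopA_eq, pvFoldB_eq, htake, hdrop]
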